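-- pv_equiv track=rewrite | github.com/dgiovannoli/voc-pipeline-ui | client_config.py | validate_client_id
-- ===== SOURCE A (Python) =====
-- def validate_client_id(client_id: str) -> bool:
--     """Validate client ID format"""
--     if not client_id:
--         return False
--
--     # Simple validation: must contain underscore and be alphanumeric + underscore
--     parts = client_id.split('_')
--     if len(parts) < 2:
--         return False
--
--     # Check if all parts are valid
--     for part in parts:
--         if not part.replace('_', '').isalnum():
--             return False
--
--     return True
-- ===== SOURCE B (Python) =====
-- def validate_client_id(client_id: str) -> bool:
--     """Validate client ID format (single pass over characters)."""
--     if not client_id: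
--         return False
--     prev_underscore = True   # True at start so a leading underscore fails
--     saw_underscore = False
--     for ch in client_id:
--         if ch == '_':
--             if prev_underscore:
--                 return False
--             prev_underscore = True
--             saw_underscore = True
--         elif ch.isalnum():
--             prev_underscore = False
--         else:
--             return False
--     return (not prev_underscore) and saw_underscore
-- ===== Notes on version B (the rewrite author's own statement) =====
-- stated objective: alternative
-- what changed: Replaces the split-on-underscore plus per-part replace/isalnum check with a single pass over the characters maintaining prev-underscore and saw-underscore flags, building no intermediate lists.
import Mathlib
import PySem

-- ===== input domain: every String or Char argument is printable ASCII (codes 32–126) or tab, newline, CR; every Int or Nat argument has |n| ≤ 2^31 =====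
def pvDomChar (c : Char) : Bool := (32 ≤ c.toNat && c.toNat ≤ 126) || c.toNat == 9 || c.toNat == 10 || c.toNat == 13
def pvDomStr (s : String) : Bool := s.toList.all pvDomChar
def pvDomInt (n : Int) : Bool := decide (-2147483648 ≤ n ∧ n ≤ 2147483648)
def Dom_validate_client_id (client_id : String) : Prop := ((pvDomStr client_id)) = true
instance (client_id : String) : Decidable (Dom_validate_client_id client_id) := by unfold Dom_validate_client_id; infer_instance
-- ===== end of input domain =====

-- B replaces A's split-on-underscore plus per-part replace/isalnum check by a single pass
-- over the characters with prev/saw-underscore flags (alternative decomposition, no intermediate lists).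


-- ===== PORT A =====
-- split on '_', require at least two parts, each part (with '_' removed) must be alphanumeric
def validate_client_id (client_id : String) : Bool :=
  let cs := client_id.toList
  if cs.isEmpty then false
  else
    let parts := PySem.Chars.splitOn cs ['_']
    if parts.length < 2 then false
    else parts.all (fun part => PySem.Chars.strIsalnum (PySem.Chars.replace part ['_'] []))

-- ===== PORT B =====
-- single pass: prev = "previous position was an underscore or the start", saw = "saw an underscore"
def vciLoop : List Char → Bool → Bool → Bool
  | [], prev, saw => if prev then false else saw
  | c :: rest, prev, saw =>
    if c = '_' then
      if prev then false else vciLoop rest true true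
    else if PySem.Chars.isalnum c then vciLoop rest false saw
    else false

def validate_client_id_alt (client_id : String) : Bool :=
  let cs := client_id.toList
  if cs.isEmpty then false
  else vciLoop cs true false

-- ===== PRECONDITION & SPEC =====
def Spec_validate_client_id (client_id : String) (out : Bool) : Prop := out = validate_client_id_alt client_id
instance (client_id : String) (out : Bool) : Decidable (Spec_validate_client_id client_id out) := by unfold Spec_validate_client_id; infer_instance

-- ===== CLAIM (what is proved, stated in full; the proofs are below) =====
def Claim_equal_validate_client_id : Prop := ∀ (client_id : String), Dom_validate_client_id client_id → Spec_validate_client_id client_id (validate_client_id client_id)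

-- ===== LEMMAS AND PROOFS =====

-- reference splitter for a one-character separator '_'
def vciSpl : List Char → List (List Char)
  | [] => [[]]
  | c :: rest =>
    if c = '_' then [] :: vciSpl rest
    else
      match vciSpl rest with
      | [] => [[c]]
      | h :: t => (c :: h) :: t

def vciConsHead (pre : List Char) : List (List Char) → List (List Char)
  | [] => [pre]
  | h :: t => (pre ++ h) :: t

lemma vciSpl_ne_nil (l : List Char) : vciSpl l ≠ [] := by
  cases l with
  | nil => simp [vciSpl]
  | cons c rest =>
    simp only [vciSpl]
    split
    · simp
    · cases h : vciSpl rest <;> simp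

lemma vciGo_spec (fuel : Nat) (l cur : List Char) (acc : List (List Char))
    (h : l.length < fuel) :
    PySem.Chars.splitOn.go ['_'] fuel l cur acc = acc.reverse ++ vciConsHead cur.reverse (vciSpl l) := by
  induction fuel generalizing l cur acc with
  | zero => omega
  | succ fuel ih =>
    cases l with
    | nil => simp [PySem.Chars.splitOn.go, vciSpl, vciConsHead]
    | cons c rest =>
      by_cases hc : c = '_'
      · subst hc
        have hpre : List.isPrefixOf ['_'] ('_' :: rest) = true := by
          simp [List.isPrefixOf]
        rw [PySem.Chars.splitOn.go]
        simp only [hpre, if_pos]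
        rw [show List.drop (['_'] : List Char).length ('_' :: rest) = rest from rfl]
        rw [ih rest [] (cur.reverse :: acc) (by simpa using Nat.lt_of_succ_lt_succ h)]
        cases hs : vciSpl rest with
        | nil => exact absurd hs (vciSpl_ne_nil rest)
        | cons h t => simp [vciSpl, vciConsHead, hs]
      · have hpre : List.isPrefixOf ['_'] (c :: rest) = false := by
          simp [List.isPrefixOf]
          exact fun h' => hc h'.symm
        rw [PySem.Chars.splitOn.go]
        simp only [hpre]
        rw [if_neg (by simp)]
        rw [ih rest (c :: cur) acc (by simpa using Nat.lt_of_succ_lt_succ h)]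
        simp only [vciSpl, hc, List.reverse_cons]
        cases hs : vciSpl rest with
        | nil => exact absurd hs (vciSpl_ne_nil rest)
        | cons h t => simp [vciConsHead]

lemma splitOn_underscore (l : List Char) : PySem.Chars.splitOn l ['_'] = vciSpl l := by
  unfold PySem.Chars.splitOn
  rw [vciGo_spec (l.length + 1) l [] [] (by omega)]
  cases hs : vciSpl l with
  | nil => exact absurd hs (vciSpl_ne_nil l)
  | cons h t => simp [vciConsHead]

lemma mem_vciSpl_no_underscore (l : List Char) (p : List Char) (hp : p ∈ vciSpl l) : '_' ∉ p := by
  induction l generalizing p with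
  | nil => simp [vciSpl] at hp; simp [hp]
  | cons c rest ih =>
    by_cases hc : c = '_'
    · subst hc
      simp [vciSpl] at hp
      rcases hp with hp | hp
      · simp [hp]
      · exact ih p hp
    · simp only [vciSpl, hc, if_false] at hp
      cases hs : vciSpl rest with
      | nil => exact absurd hs (vciSpl_ne_nil rest)
      | cons h t =>
        rw [hs] at hp
        simp at hp
        rcases hp with hp | hp
        · subst hp
          have hh : '_' ∉ h := ih h (by rw [hs]; simp)
          simp [hh]
          exact fun contra => hc contra.symm
        · exact ih p (by rw [hs]; simp [hp])

lemma replace_go_id (fuel : Nat) (l acc : List Char) (h : l.length ≤ fuel) (hn : '_' ∉ l) :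
    PySem.Chars.replace.go ['_'] [] fuel l acc = acc.reverse ++ l := by
  induction fuel generalizing l acc with
  | zero =>
    have : l = [] := by
      cases l with
      | nil => rfl
      | cons c t => simp at h
    subst this
    simp [PySem.Chars.replace.go]
  | succ fuel ih =>
    cases l with
    | nil => simp [PySem.Chars.replace.go]
    | cons c rest =>
      have hc : c ≠ '_' := by intro hc; exact hn (by simp [hc])
      have hpre : List.isPrefixOf ['_'] (c :: rest) = false := by
        simp [List.isPrefixOf]; exact fun contra => hc contra.symm
      rw [PySem.Chars.replace.go]
      simp only [hpre]
      rw [if_neg (by simp)]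
      rw [ih rest (c :: acc) (by simp at h; omega) (fun hm => hn (by simp [hm]))]
      simp

lemma replace_id (p : List Char) (hn : '_' ∉ p) : PySem.Chars.replace p ['_'] [] = p := by
  unfold PySem.Chars.replace
  rw [if_neg (by simp)]
  simpa using replace_go_id p.length p [] (by omega) hn

-- the loop of B computes, in terms of the reference split, exactly this
lemma vciLoop_spec (l : List Char) (prev saw : Bool) :
    vciLoop l prev saw =
      ((if prev then PySem.Chars.strIsalnum (vciSpl l).headI
        else (vciSpl l).headI.all PySem.Chars.isalnum)
       && (vciSpl l).tail.all PySem.Chars.strIsalnum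
       && (saw || decide (2 ≤ (vciSpl l).length))) := by
  induction l generalizing prev saw with
  | nil =>
    simp [vciLoop, vciSpl, PySem.Chars.strIsalnum]
  | cons c rest ih =>
    by_cases hc : c = '_'
    · subst hc
      rw [show vciSpl ('_' :: rest) = [] :: vciSpl rest from by simp [vciSpl]]
      cases prev with
      | true => simp [vciLoop, PySem.Chars.strIsalnum]
      | false =>
        rw [show vciLoop ('_' :: rest) false saw = vciLoop rest true true from by
          simp [vciLoop]]
        rw [ih true true]
        cases hs : vciSpl rest with
        | nil => exact absurd hs (vciSpl_ne_nil rest)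
        | cons h t =>
          simp [PySem.Chars.strIsalnum, Bool.and_comm]
    · rw [show vciSpl (c :: rest) = match vciSpl rest with
            | [] => [[c]]
            | h :: t => (c :: h) :: t from by simp [vciSpl, hc]]
      cases hs : vciSpl rest with
      | nil => exact absurd hs (vciSpl_ne_nil rest)
      | cons h t =>
        by_cases ha : PySem.Chars.isalnum c = true
        · rw [show vciLoop (c :: rest) prev saw = vciLoop rest false saw from by
            simp [vciLoop, hc, ha]]
          rw [ih false saw, hs]
          simp [PySem.Chars.strIsalnum, ha]
        · rw [show vciLoop (c :: rest) prev saw = false from by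
            simp [vciLoop, hc, ha]]
          cases prev <;> simp [PySem.Chars.strIsalnum, ha]

lemma all_replace_eq (parts : List (List Char)) (h : ∀ p ∈ parts, '_' ∉ p) :
    parts.all (fun part => PySem.Chars.strIsalnum (PySem.Chars.replace part ['_'] []))
      = parts.all PySem.Chars.strIsalnum := by
  induction parts with
  | nil => rfl
  | cons p rest ih =>
    simp only [List.all_cons]
    rw [replace_id p (h p (by simp)), ih (fun q hq => h q (by simp [hq]))]

-- ===== VERDICT (by name: the statement is the Claim_ definition above) =====
theorem validate_client_id_spec : Claim_equal_validate_client_id := by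
  intro client_id _
  unfold Spec_validate_client_id validate_client_id validate_client_id_alt
  set cs := client_id.toList with hcs
  by_cases he : cs.isEmpty
  · simp [he]
  · simp only [he, Bool.false_eq_true, if_false]
    rw [splitOn_underscore, vciLoop_spec,
        all_replace_eq (vciSpl cs) (fun p hp => mem_vciSpl_no_underscore cs p hp)]
    cases hs : vciSpl cs with
    | nil => exact absurd hs (vciSpl_ne_nil cs)
    | cons h t =>
      simp only [List.headI, List.tail_cons, List.all_cons, if_pos]
      by_cases h2 : (h :: t).length < 2
      · have ht : t = [] := by
          cases t with
          | nil => rfl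
          | cons a b => simp at h2
        subst ht
        simp
      · have hts : t ≠ [] := by
          intro ht; subst ht; simp at h2
        rw [if_neg h2]
        have hd : decide (2 ≤ (h :: t).length) = true := by
          cases t with
          | nil => exact absurd rfl hts
          | cons a b => simp
        rw [hd]
        simp
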